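-- pv_equiv track=rewrite | github.com/James-HoneyBadger/Time_Warp | core/interpreter.py | _preprocess_logo_program
-- ===== SOURCE A (Python) =====
-- def _preprocess_logo_program(program_text):
--     """Preprocess Logo program to handle multi-line REPEAT blocks"""
--     lines = program_text.split("\n")
--     processed_lines = []
--     i = 0
--
--     while i < len(lines):
--         line = lines[i].strip()
--
--         # Strip comments from the line
--         if ';' in line:
--             line = line.split(';', 1)[0].strip()
--
--         # Check if this is a REPEAT command with opening bracket
--         if line.upper().startswith("REPEAT ") and "[" in line and "]" not in line:
--             # Multi-line REPEAT block
--             repeat_block = line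
--             i += 1
--             bracket_depth = line.count("[") - line.count("]")
--
--             # Collect lines until brackets are balanced
--             while i < len(lines) and bracket_depth > 0:
--                 next_line = lines[i].strip()
--                 # Strip comments from next line too
--                 if ';' in next_line:
--                     next_line = next_line.split(';', 1)[0].strip()
--                 if next_line and not next_line.startswith(
--                     ";"
--                 ):  # Skip empty and comment lines
--                     repeat_block += " " + next_line
--                     bracket_depth += next_line.count("[") - next_line.count("]")
--                 i += 1
--
--             processed_lines.append(repeat_block)
--         else:
--             if line:  # Only add non-empty lines
--                 processed_lines.append(line)
--             i += 1
--
--     return "\n".join(processed_lines)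
-- ===== SOURCE B (Python) =====
-- def _preprocess_logo_program(program_text):
--     """Preprocess Logo program to handle multi-line REPEAT blocks.
--
--     Staged passes instead of A's nested index loops: (1) clean every line and
--     drop empty ones, (2) compute the token-length of each output group from
--     bracket depth, (3) rebuild each group by joining a slice of the token list.
--     """
--     # stage 1: strip whitespace and comments, keep non-empty lines only
--     tokens = []
--     for raw in program_text.split("\n"):
--         s = raw.strip()
--         if ';' in s:
--             s = s.split(';', 1)[0].strip()
--         if s:
--             tokens.append(s)
--
--     # stage 2: group lengths (a multi-line REPEAT block spans several tokens)
--     lens = []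
--     cur = 0      # tokens in the currently open block, 0 = no open block
--     depth = 0    # bracket depth of the open block
--     for t in tokens:
--         if depth > 0:
--             cur += 1
--             depth += t.count('[') - t.count(']')
--             if depth <= 0:
--                 lens.append(cur)
--                 cur = 0
--         elif t.upper().startswith("REPEAT ") and '[' in t and ']' not in t:
--             cur = 1
--             depth = t.count('[')
--         else:
--             lens.append(1)
--     if cur:
--         lens.append(cur)
--
--     # stage 3: join each group's slice of tokens
--     out = []
--     rest = tokens
--     for L in lens:
--         out.append(' '.join(rest[:L]))
--         rest = rest[L:]
--     return '\n'.join(out)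
-- ===== Notes on version B (the rewrite author's own statement) =====
-- stated objective: alternative
-- what changed: A's index-based outer while with an inner consuming while that concatenates block strings incrementally is replaced by three staged passes: clean and filter the lines into a token list, compute each output group's token count from bracket depth, then rebuild the output by space-joining successive slices of the token list.
import Mathlib
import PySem

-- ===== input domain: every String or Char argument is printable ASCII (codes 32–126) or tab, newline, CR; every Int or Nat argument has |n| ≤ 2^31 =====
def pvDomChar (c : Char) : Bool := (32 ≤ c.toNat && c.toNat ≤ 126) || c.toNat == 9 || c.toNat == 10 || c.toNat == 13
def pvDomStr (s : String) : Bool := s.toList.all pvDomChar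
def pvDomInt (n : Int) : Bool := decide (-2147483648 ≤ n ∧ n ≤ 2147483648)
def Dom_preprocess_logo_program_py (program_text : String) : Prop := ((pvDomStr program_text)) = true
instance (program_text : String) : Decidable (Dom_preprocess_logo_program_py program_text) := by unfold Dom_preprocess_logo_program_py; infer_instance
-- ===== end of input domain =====

-- B replaces A's nested index loops (outer while + inner consuming while building block
-- strings incrementally) by three staged passes: clean+filter lines into tokens, compute
-- each output group's token count from bracket depth, then join slices of the token list.

-- Shared helpers: both Pythons contain these identical lines
-- (strip + comment strip; the REPEAT-start test; the bracket-depth delta of a line).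
def pvClean (l : String) : String :=
  let s := PySem.Str.strip l
  if PySem.Str.isIn ";" s then
    PySem.Str.strip ((((PySem.Str.splitMax? s ";" 1).getD []).headD ""))
  else s

def pvIsRepeatStart (line : String) : Bool :=
  PySem.Str.startswith (PySem.Str.upper line) "REPEAT " &&
    PySem.Str.isIn "[" line && !(PySem.Str.isIn "]" line)

def pvDepth (s : String) : Int :=
  (PySem.Str.count s "[" : Int) - (PySem.Str.count s "]" : Int)

-- ===== PORT A =====
-- A's inner `while i < len(lines) and bracket_depth > 0` loop: consumes lines, returns the
-- finished block and the remaining lines.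
def pvInnerA (ls : List String) (block : String) (depth : Int) : String × List String :=
  if 0 < depth then
    match ls with
    | [] => (block, [])
    | l :: rest =>
      if (pvClean l != "" && !(PySem.Str.startswith (pvClean l) ";")) then
        pvInnerA rest (PySem.Str.join " " [block, pvClean l]) (depth + pvDepth (pvClean l))
      else
        pvInnerA rest block depth
  else (block, ls)

-- Step equations for pvInnerA (one eq_def rewrite each).
theorem pvInnerA_nil (block : String) (depth : Int) :
    pvInnerA [] block depth = (block, []) := by
  rw [pvInnerA.eq_def]; split <;> rfl

theorem pvInnerA_cons (l : String) (rest : List String) (block : String) (depth : Int)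
    (h : 0 < depth) :
    pvInnerA (l :: rest) block depth =
      if (pvClean l != "" && !(PySem.Str.startswith (pvClean l) ";")) then
        pvInnerA rest (PySem.Str.join " " [block, pvClean l]) (depth + pvDepth (pvClean l))
      else pvInnerA rest block depth := by
  rw [pvInnerA.eq_def, if_pos h]

theorem pvInnerA_nonpos (ls : List String) (block : String) (depth : Int)
    (h : ¬ 0 < depth) :
    pvInnerA ls block depth = (block, ls) := by
  rw [pvInnerA.eq_def, if_neg h]

-- The remaining lines returned by the inner loop are a suffix of its input
-- (needed for the outer loop's termination).
theorem pvInnerA_len (ls : List String) (block : String) (depth : Int) :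
    (pvInnerA ls block depth).2.length ≤ ls.length := by
  induction ls generalizing block depth with
  | nil => rw [pvInnerA_nil]
  | cons l rest ih =>
    by_cases hd : 0 < depth
    · rw [pvInnerA_cons _ _ _ _ hd]
      by_cases hne : ((pvClean l != "") && !(PySem.Str.startswith (pvClean l) ";")) = true
      · rw [if_pos hne]; exact le_trans (ih _ _) (Nat.le_succ _)
      · rw [if_neg hne]; exact le_trans (ih _ _) (Nat.le_succ _)
    · rw [pvInnerA_nonpos _ _ _ hd]

-- A's outer `while i < len(lines)` loop over the remaining lines, accumulating processed_lines.
def pvOuterA (ls : List String) (acc : List String) : List String :=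
  match ls with
  | [] => acc
  | l :: rest =>
    if pvIsRepeatStart (pvClean l) then
      pvOuterA (pvInnerA rest (pvClean l) (pvDepth (pvClean l))).2
        (acc ++ [(pvInnerA rest (pvClean l) (pvDepth (pvClean l))).1])
    else if pvClean l != "" then pvOuterA rest (acc ++ [pvClean l])
    else pvOuterA rest acc
termination_by ls.length
decreasing_by
  · have := pvInnerA_len rest (pvClean l) (pvDepth (pvClean l))
    simp only [List.length_cons]; omega
  · simp
  · simp

def preprocess_logo_program_py (program_text : String) : String :=
  PySem.Str.join "\n" (pvOuterA ((PySem.Str.split? program_text "\n").getD []) [])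

-- ===== PORT B =====
-- stage 1: clean every line, keep the non-empty ones (Source B's first loop).
def pvTokens (ls : List String) : List String :=
  ls.foldl (fun acc raw =>
    let s := pvClean raw
    if s != "" then acc ++ [s] else acc) []

-- stage 2 step: state = (group lengths so far, tokens in the open block, its depth).
def pvLensStep (st : List Int × Int × Int) (t : String) : List Int × Int × Int :=
  match st with
  | (lens, cur, depth) =>
    if 0 < depth then
      if depth + pvDepth t ≤ 0 then (lens ++ [cur + 1], 0, depth + pvDepth t)
      else (lens, cur + 1, depth + pvDepth t)
    else if pvIsRepeatStart t then (lens, 1, (PySem.Str.count t "[" : Int))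
    else (lens ++ [1], cur, depth)

-- Source B's `if cur: lens.append(cur)` after the stage-2 loop.
def pvLensFlush (st : List Int × Int × Int) : List Int :=
  if st.2.1 ≠ 0 then st.1 ++ [st.2.1] else st.1

-- stage 3 step: state = (output lines, remaining tokens); consumes one group's slice.
def pvChunkStep (st : List String × List String) (L : Int) : List String × List String :=
  (st.1 ++ [PySem.Str.join " " (PySem.List.slice st.2 none (some L))],
    PySem.List.slice st.2 (some L) none)

def preprocess_logo_program_py_alt (program_text : String) : String :=
  let tokens := pvTokens ((PySem.Str.split? program_text "\n").getD [])
  let lens := pvLensFlush (tokens.foldl pvLensStep ([], 0, 0))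
  PySem.Str.join "\n" ((lens.foldl pvChunkStep ([], tokens)).1)

-- ===== PRECONDITION & SPEC =====
def Spec_preprocess_logo_program_py (program_text : String) (out : String) : Prop := out = preprocess_logo_program_py_alt program_text
instance (program_text : String) (out : String) : Decidable (Spec_preprocess_logo_program_py program_text out) := by unfold Spec_preprocess_logo_program_py; infer_instance

-- ===== CLAIM (what is proved, stated in full; the proofs are below) =====
def Claim_equal_preprocess_logo_program_py : Prop := ∀ (program_text : String), Dom_preprocess_logo_program_py program_text → Spec_preprocess_logo_program_py program_text (preprocess_logo_program_py program_text)

-- ===== LEMMAS AND PROOFS =====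

-- Step equations for pvOuterA.
theorem pvOuterA_nil (acc : List String) : pvOuterA [] acc = acc := by
  rw [pvOuterA.eq_def]

theorem pvOuterA_cons (l : String) (rest acc : List String) :
    pvOuterA (l :: rest) acc =
      if pvIsRepeatStart (pvClean l) then
        pvOuterA (pvInnerA rest (pvClean l) (pvDepth (pvClean l))).2
          (acc ++ [(pvInnerA rest (pvClean l) (pvDepth (pvClean l))).1])
      else if pvClean l != "" then pvOuterA rest (acc ++ [pvClean l])
      else pvOuterA rest acc := by
  rw [pvOuterA.eq_def]

-- A single-character needle: PySem.Chars.count is List.count.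
theorem pv_count_go_singleton (c : Char) (l : List Char) :
    ∀ (fuel acc : Nat), l.length ≤ fuel →
      PySem.Chars.count.go [c] fuel l acc = acc + l.count c := by
  induction l with
  | nil => intro fuel acc _; cases fuel <;> simp [PySem.Chars.count.go]
  | cons h t ih =>
    intro fuel acc hf
    cases fuel with
    | zero => simp at hf
    | succ m =>
      simp only [List.length_cons] at hf
      rw [PySem.Chars.count.go]
      by_cases hc : c = h
      · subst hc
        have hpre : ([c].isPrefixOf (c :: t)) = true := by
          show (c == c && List.isPrefixOf [] t) = true
          simp [List.isPrefixOf]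
        rw [hpre]
        simp only [if_true, List.length_cons, List.length_nil, List.drop_succ_cons,
          List.drop_zero]
        rw [ih m (acc + 1) (by omega), List.count_cons]
        simp only [BEq.rfl, if_true]
        omega
      · have hpre : ([c].isPrefixOf (h :: t)) = false := by
          show (c == h && List.isPrefixOf [] t) = false
          rw [beq_eq_false_iff_ne.mpr hc]
          simp
        rw [hpre]
        simp only [Bool.false_eq_true, if_false]
        rw [ih m acc (by omega), List.count_cons]
        rw [show (h == c) = false from beq_eq_false_iff_ne.mpr (fun e => hc e.symm)]
        simp

theorem pv_count_singleton (s : List Char) (c : Char) :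
    PySem.Chars.count s [c] = s.count c := by
  rw [PySem.Chars.count]
  simp only [List.isEmpty_iff, reduceCtorEq, if_false]
  simpa using pv_count_go_singleton c s s.length 0 le_rfl

theorem pv_singleton_infix_iff (c : Char) (s : List Char) : [c] <:+: s ↔ c ∈ s := by
  constructor
  · intro h
    exact List.singleton_sublist.mp h.sublist
  · intro h
    obtain ⟨p, q, rfl⟩ := List.append_of_mem h
    exact ⟨p, q, by simp⟩

-- A line passing the REPEAT-start test has no ']' and at least one '[',
-- so its bracket-depth delta is its '['-count, and it is positive.
theorem pv_start_counts (line : String) (h : pvIsRepeatStart line = true) :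
    PySem.Str.count line "]" = 0 ∧ 0 < PySem.Str.count line "[" := by
  unfold pvIsRepeatStart at h
  simp only [Bool.and_eq_true, Bool.not_eq_true'] at h
  obtain ⟨⟨-, hop⟩, hcl⟩ := h
  constructor
  · have hni : ¬ ((']' :: []) <:+: line.toList) := by
      intro hin
      have hiff := PySem.Str.isIn_iff_infix (sub := "]") (s := line)
      rw [hcl] at hiff
      exact absurd (hiff.mpr (by simpa using hin)) (by simp)
    simp only [PySem.Str.count_eq]
    rw [show ("]".toList) = [']'] from rfl, pv_count_singleton]
    exact List.count_eq_zero.mpr (fun hm => hni ((pv_singleton_infix_iff _ _).mpr hm))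
  · have hmem : '[' ∈ line.toList := by
      have := (PySem.Str.isIn_iff_infix (sub := "[") (s := line)).mp hop
      exact (pv_singleton_infix_iff _ _).mp (by simpa using this)
    simp only [PySem.Str.count_eq]
    rw [show ("[".toList) = ['['] from rfl, pv_count_singleton]
    exact List.count_pos_iff.mpr hmem

theorem pv_start_depth (line : String) (h : pvIsRepeatStart line = true) :
    pvDepth line = (PySem.Str.count line "[" : Int) ∧ 0 < pvDepth line := by
  obtain ⟨h0, h1⟩ := pv_start_counts line h
  unfold pvDepth
  rw [h0]
  refine ⟨by simp, ?_⟩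
  simp only [Nat.cast_zero, sub_zero]
  exact_mod_cast h1

-- ---- cleaned lines contain no ';' (so the `startswith(';')` test in A never fires) ----

-- The head of splitOnMax.go's result is the earliest piece pushed into acc.
theorem pvGoLast (fuel : Nat) : ∀ (m : Nat) (l cur : List Char) (as : List (List Char))
    (a0 : List Char),
    (PySem.Chars.splitOnMax.go [';'] fuel m l cur (as ++ [a0])).headD [] = a0 := by
  induction fuel with
  | zero =>
    intro m l cur as a0
    rw [PySem.Chars.splitOnMax.go]
    simp
  | succ n ih =>
    intro m l cur as a0
    cases l with
    | nil =>
      rw [PySem.Chars.splitOnMax.go]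
      simp
      omega
    | cons c rest =>
      rw [PySem.Chars.splitOnMax.go]
      by_cases hm : m = 0
      · rw [if_pos hm]
        simp
      · rw [if_neg hm]
        by_cases hp : ([';'].isPrefixOf (c :: rest)) = true
        · rw [if_pos hp]
          have := ih (m-1) (List.drop [';'].length (c::rest)) [] (cur.reverse :: as) a0
          simpa using this
        · rw [if_neg hp]
          exact ih m rest (c :: cur) as a0


-- With maxsplit 1 and empty acc: the head piece is everything before the first ';'.
theorem pvGoHead (fuel : Nat) : ∀ (l cur : List Char), l.length < fuel →
    (PySem.Chars.splitOnMax.go [';'] fuel 1 l cur []).headD [] =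
      cur.reverse ++ l.takeWhile (fun c => c != ';') := by
  induction fuel with
  | zero => intro l cur h; omega
  | succ n ih =>
    intro l cur h
    cases l with
    | nil =>
      rw [PySem.Chars.splitOnMax.go]
      simp
      omega
    | cons c rest =>
      rw [PySem.Chars.splitOnMax.go]
      rw [if_neg (by omega : ¬ (1 : Nat) = 0)]
      by_cases hp : ([';'].isPrefixOf (c :: rest)) = true
      · rw [if_pos hp]
        have hc : c = ';' := by
          have : (';' == c && List.isPrefixOf [] rest) = true := hp
          simp at this
          exact this.symm
        subst hc
        have := pvGoLast n 0 (List.drop [';'].length (';'::rest)) [] [] cur.reverse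
        simp only [List.nil_append] at this
        rw [this]
        simp [List.takeWhile]
      · rw [if_neg hp]
        have hc : ¬ c = ';' := by
          intro hc; subst hc
          exact hp (by simp [List.isPrefixOf])
        rw [ih rest (c :: cur) (by simpa using Nat.lt_of_succ_lt_succ h)]
        rw [show (List.takeWhile (fun c => c != ';') (c :: rest)) =
          c :: List.takeWhile (fun c => c != ';') rest from by
            simp [List.takeWhile, bne, beq_eq_false_iff_ne.mpr hc]]
        simp

theorem pv_rstrip_sublist (x : List Char) : (PySem.Chars.rstrip x).Sublist x := by
  unfold PySem.Chars.rstrip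
  have h := (List.dropWhile_sublist (p := PySem.Chars.isspace) (l := x.reverse)).reverse
  simpa using h

theorem pv_strip_sublist (cs : List Char) : (PySem.Chars.strip cs).Sublist cs := by
  unfold PySem.Chars.strip PySem.Chars.lstrip
  exact (pv_rstrip_sublist _).trans (List.dropWhile_sublist _)

theorem pv_head_piece (s : String) :
    (((PySem.Str.splitMax? s ";" 1).getD []).headD "") =
      String.ofList (s.toList.takeWhile (fun c => c != ';')) := by
  rw [PySem.Str.splitMax?]
  rw [show (";".toList) = [';'] from rfl]
  rw [PySem.Chars.splitMax?]
  simp only [List.isEmpty_cons, Bool.false_eq_true, if_false, Option.map_some, Option.getD_some]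
  rw [PySem.Chars.splitOnMax]
  rw [if_neg (by norm_num : ¬ (1 : Int) < 0)]
  have hgo := pvGoHead (s.toList.length + 1) s.toList [] (Nat.lt_succ_self _)
  rw [show ((1 : Int).toNat) = 1 from rfl]
  cases hxs : PySem.Chars.splitOnMax.go [';'] (s.toList.length + 1) 1 s.toList [] [] with
  | nil =>
    rw [hxs] at hgo
    simp only [List.headD_nil, List.reverse_nil, List.nil_append] at hgo
    simp [← hgo]
  | cons x xs => rw [hxs] at hgo; simp only [List.headD_cons] at hgo; simp [hgo]

theorem pvClean_no_semi (l : String) : ';' ∉ (pvClean l).toList := by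
  unfold pvClean
  by_cases hin : PySem.Str.isIn ";" (PySem.Str.strip l) = true
  · rw [if_pos hin]
    intro hmem
    rw [pv_head_piece] at hmem
    rw [PySem.Str.toList_strip, String.toList_ofList] at hmem
    have hmem2 := (pv_strip_sublist _).subset hmem
    have := List.mem_takeWhile_imp hmem2
    simp at this
  · rw [if_neg hin]
    intro hmem
    apply hin
    rw [PySem.Str.isIn_iff_infix]
    rw [show (";".toList) = [';'] from rfl]
    exact (pv_singleton_infix_iff _ _).mpr hmem

theorem pvClean_not_semi_start (l : String) :
    PySem.Str.startswith (pvClean l) ";" = false := by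
  by_contra h
  have hsw : PySem.Str.startswith (pvClean l) ";" = true := by
    cases hb : PySem.Str.startswith (pvClean l) ";" with
    | false => exact absurd hb h
    | true => rfl
  rw [PySem.Str.startswith_eq] at hsw
  have hpre : (";".toList) <+: (pvClean l).toList := by
    rw [PySem.Chars.startswith] at hsw
    exact List.isPrefixOf_iff_prefix.mp hsw
  have : ';' ∈ (pvClean l).toList := hpre.subset (by simp)
  exact pvClean_no_semi l this

-- ---- the token list (stage 1) ----
def pvTokF (ls : List String) : List String := (ls.map pvClean).filter (fun s => s != "")

theorem pvTokF_cons (l : String) (ls : List String) :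
    pvTokF (l :: ls) = if pvClean l != "" then pvClean l :: pvTokF ls else pvTokF ls := by
  simp only [pvTokF, List.map_cons, List.filter_cons]

theorem pvTokens_aux (ls : List String) : ∀ acc,
    ls.foldl (fun acc raw =>
      let s := pvClean raw
      if s != "" then acc ++ [s] else acc) acc = acc ++ pvTokF ls := by
  induction ls with
  | nil => intro acc; simp [pvTokF]
  | cons l r ih =>
    intro acc
    rw [List.foldl_cons, pvTokF_cons]
    by_cases h : (pvClean l != "") = true
    · simp only [h, if_true]
      rw [ih (acc ++ [pvClean l])]
      simp
    · rw [if_neg h, if_neg h]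
      exact ih acc

theorem pvTokens_eq (ls : List String) : pvTokens ls = pvTokF ls := by
  unfold pvTokens
  simpa using pvTokens_aux ls []

-- ---- the group decomposition of a token list ----
def pvTakeBlock : List String → Int → List String × List String
  | [], _ => ([], [])
  | t :: r, depth =>
    if 0 < depth then
      let p := pvTakeBlock r (depth + pvDepth t)
      (t :: p.1, p.2)
    else ([], t :: r)

theorem pvTakeBlock_len (ts : List String) : ∀ d, (pvTakeBlock ts d).2.length ≤ ts.length := by
  induction ts with
  | nil => intro d; simp [pvTakeBlock]
  | cons t r ih =>
    intro d
    simp only [pvTakeBlock]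
    split
    · exact le_trans (ih _) (Nat.le_succ _)
    · simp

theorem pvTakeBlock_nonpos (ts : List String) (d : Int) (h : ¬ 0 < d) :
    pvTakeBlock ts d = ([], ts) := by
  cases ts <;> simp [pvTakeBlock, h]

theorem pvTakeBlock_cons (t : String) (r : List String) (d : Int) (h : 0 < d) :
    pvTakeBlock (t :: r) d =
      (t :: (pvTakeBlock r (d + pvDepth t)).1, (pvTakeBlock r (d + pvDepth t)).2) := by
  conv_lhs => rw [pvTakeBlock]
  simp [h]

def pvGroups : List String → List (List String)
  | [] => []
  | t :: r =>
    if pvIsRepeatStart t then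
      (t :: (pvTakeBlock r (pvDepth t)).1) :: pvGroups (pvTakeBlock r (pvDepth t)).2
    else [t] :: pvGroups r
termination_by ts => ts.length
decreasing_by
  · have := pvTakeBlock_len r (pvDepth t)
    simp only [List.length_cons]; omega
  · simp

theorem pvGroups_nil : pvGroups [] = [] := by rw [pvGroups.eq_def]

theorem pvGroups_cons (t : String) (r : List String) :
    pvGroups (t :: r) =
      if pvIsRepeatStart t then
        (t :: (pvTakeBlock r (pvDepth t)).1) :: pvGroups (pvTakeBlock r (pvDepth t)).2
      else [t] :: pvGroups r := by
  rw [pvGroups.eq_def]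

theorem pvTakeBlock_append (ts : List String) : ∀ d,
    (pvTakeBlock ts d).1 ++ (pvTakeBlock ts d).2 = ts := by
  induction ts with
  | nil => intro d; simp [pvTakeBlock]
  | cons t r ih =>
    intro d
    simp only [pvTakeBlock]
    split
    · simp [ih]
    · simp

theorem pvGroups_flatten_aux (n : Nat) : ∀ (ts : List String), ts.length ≤ n →
    (pvGroups ts).flatten = ts := by
  induction n with
  | zero =>
    intro ts h
    rw [List.eq_nil_of_length_eq_zero (Nat.le_zero.mp h)]
    simp [pvGroups_nil]
  | succ n ih =>
    intro ts h
    cases ts with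
    | nil => simp [pvGroups_nil]
    | cons t r =>
      rw [pvGroups_cons]
      by_cases hs : pvIsRepeatStart t = true
      · rw [if_pos hs]
        rw [List.flatten_cons]
        rw [ih _ (le_trans (pvTakeBlock_len r (pvDepth t)) (by simpa using Nat.lt_succ_iff.mp (Nat.lt_of_lt_of_le (Nat.lt_succ_self _) h)))]
        simp [pvTakeBlock_append]
      · rw [if_neg hs, List.flatten_cons]
        rw [ih r (by simpa using h)]
        simp

theorem pvGroups_flatten (ts : List String) : (pvGroups ts).flatten = ts :=
  pvGroups_flatten_aux ts.length ts le_rfl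

-- ---- ' '.join over a group equals A's incremental concatenation ----
theorem pv_join_singleton (t : String) : PySem.Str.join " " [t] = t := by
  have h : (PySem.Str.join " " [t]).toList = t.toList := by
    rw [PySem.Str.toList_join]
    simp [PySem.Chars.join_singleton]
  calc PySem.Str.join " " [t] = String.ofList (PySem.Str.join " " [t]).toList :=
        String.ofList_toList.symm
    _ = String.ofList t.toList := by rw [h]
    _ = t := String.ofList_toList

theorem pv_join_cons_cons (x y : String) (l : List String) :
    PySem.Str.join " " (x :: y :: l) = PySem.Str.join " " (PySem.Str.join " " [x, y] :: l) := by
  have h : (PySem.Str.join " " (x :: y :: l)).toList =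
      (PySem.Str.join " " (PySem.Str.join " " [x, y] :: l)).toList := by
    cases l with
    | nil =>
      simp [PySem.Str.toList_join, PySem.Chars.join_cons_cons, PySem.Chars.join_singleton]
    | cons z l' =>
      simp [PySem.Str.toList_join, PySem.Chars.join_cons_cons, PySem.Chars.join_singleton]
  calc PySem.Str.join " " (x :: y :: l)
      = String.ofList (PySem.Str.join " " (x :: y :: l)).toList := String.ofList_toList.symm
    _ = String.ofList (PySem.Str.join " " (PySem.Str.join " " [x, y] :: l)).toList := by rw [h]
    _ = _ := String.ofList_toList

theorem pv_joinSp_foldl (g : List String) : ∀ t,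
    PySem.Str.join " " (t :: g) =
      g.foldl (fun a b => PySem.Str.join " " [a, b]) t := by
  induction g with
  | nil => intro t; simpa using pv_join_singleton t
  | cons b g' ih =>
    intro t
    rw [pv_join_cons_cons, ih (PySem.Str.join " " [t, b]), List.foldl_cons]

-- ---- A's nested loops compute the groups ----
theorem pvInnerA_groups (ts : List String) : ∀ block depth,
    (pvInnerA ts block depth).1 =
      (pvTakeBlock (pvTokF ts) depth).1.foldl (fun a b => PySem.Str.join " " [a, b]) block
    ∧ pvTokF (pvInnerA ts block depth).2 = (pvTakeBlock (pvTokF ts) depth).2 := by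
  induction ts with
  | nil =>
    intro block depth
    rw [pvInnerA_nil]
    rw [show pvTokF [] = [] from rfl]
    rw [show pvTakeBlock ([] : List String) depth = ([], []) from rfl]
    exact ⟨rfl, rfl⟩
  | cons l r ih =>
    intro block depth
    by_cases hd : 0 < depth
    · rw [pvInnerA_cons _ _ _ _ hd]
      have hcond : (pvClean l != "" && !(PySem.Str.startswith (pvClean l) ";")) =
          (pvClean l != "") := by
        rw [pvClean_not_semi_start]; simp
      rw [hcond, pvTokF_cons]
      by_cases hne : (pvClean l != "") = true
      · rw [if_pos hne, if_pos hne]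
        rw [pvTakeBlock_cons _ _ _ hd]
        refine ⟨?_, (ih _ _).2⟩
        rw [(ih _ _).1, List.foldl_cons]
      · rw [if_neg hne, if_neg hne]
        exact ih block depth
    · rw [pvInnerA_nonpos _ _ _ hd, pvTakeBlock_nonpos _ _ hd]
      constructor
      · rw [show ((block, l :: r).1) = block from rfl]
        rw [show (([], pvTokF (l :: r)).1) = ([] : List String) from rfl]
        rw [List.foldl_nil]
      · rw [show ((block, l :: r).2) = l :: r from rfl]

theorem pvOuterA_groups_aux (n : Nat) : ∀ (ls : List String), ls.length ≤ n →
    ∀ acc, pvOuterA ls acc =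
      acc ++ (pvGroups (pvTokF ls)).map (fun g => PySem.Str.join " " g) := by
  induction n with
  | zero =>
    intro ls h acc
    rw [List.eq_nil_of_length_eq_zero (Nat.le_zero.mp h)]
    simp [pvOuterA_nil, pvTokF, pvGroups_nil]
  | succ n ih =>
    intro ls h acc
    cases ls with
    | nil => simp [pvOuterA_nil, pvTokF, pvGroups_nil]
    | cons l rest =>
      rw [pvOuterA_cons, pvTokF_cons]
      by_cases hs : pvIsRepeatStart (pvClean l) = true
      · rw [if_pos hs]
        have hne : (pvClean l != "") = true := by
          by_contra hne
          have hz : pvClean l = "" := by simpa using hne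
          rw [hz] at hs
          exact absurd hs (by decide)
        rw [if_pos hne, pvGroups_cons, if_pos hs]
        obtain ⟨h1, h2⟩ := pvInnerA_groups rest (pvClean l) (pvDepth (pvClean l))
        have hlen : (pvInnerA rest (pvClean l) (pvDepth (pvClean l))).2.length ≤ n :=
          le_trans (pvInnerA_len rest _ _) (by simpa using h)
        rw [ih _ hlen]
        rw [h2, h1, ← pv_joinSp_foldl]
        simp [List.map_cons]
      · rw [if_neg hs]
        by_cases hne : (pvClean l != "") = true
        · rw [if_pos hne, if_pos hne, pvGroups_cons, if_neg hs]
          rw [ih rest (by simpa using h) (acc ++ [pvClean l])]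
          simp [pv_join_singleton]
        · rw [if_neg hne, if_neg hne]
          exact ih rest (by simpa using h) acc

theorem pvOuterA_groups (ls : List String) (acc : List String) :
    pvOuterA ls acc = acc ++ (pvGroups (pvTokF ls)).map (fun g => PySem.Str.join " " g) :=
  pvOuterA_groups_aux ls.length ls le_rfl acc

-- ---- B's stage 2 computes the groups' lengths ----
theorem pvLens_groups (ts : List String) :
    (∀ lens d, d ≤ 0 → pvLensFlush (ts.foldl pvLensStep (lens, 0, d)) =
        lens ++ (pvGroups ts).map (fun g => (g.length : Int)))
    ∧ (∀ lens cur d, 0 < d → 1 ≤ cur →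
        pvLensFlush (ts.foldl pvLensStep (lens, cur, d)) =
          lens ++ [cur + ((pvTakeBlock ts d).1.length : Int)]
            ++ (pvGroups (pvTakeBlock ts d).2).map (fun g => (g.length : Int))) := by
  induction ts with
  | nil =>
    constructor
    · intro lens d hd
      rw [List.foldl_nil]
      simp [pvLensFlush, pvGroups_nil]
    · intro lens cur d hd hcur
      rw [List.foldl_nil]
      have hc0 : cur ≠ 0 := by omega
      simp [pvLensFlush, pvTakeBlock, pvGroups_nil, hc0]
  | cons t r ih =>
    constructor
    · intro lens d hd
      rw [List.foldl_cons]
      have hnd : ¬ 0 < d := by omega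
      rw [pvGroups_cons]
      by_cases hs : pvIsRepeatStart t = true
      · have hstep : pvLensStep (lens, 0, d) t =
            (lens, 1, (PySem.Str.count t "[" : Int)) := by
          simp [pvLensStep, hnd, hs]
        rw [hstep]
        obtain ⟨hdep, hpos⟩ := pv_start_depth t hs
        rw [← hdep]
        rw [ih.2 lens 1 (pvDepth t) hpos le_rfl]
        rw [if_pos hs]
        simp only [List.map_cons, List.length_cons]
        push_cast
        simp [Int.add_comm]
      · have hstep : pvLensStep (lens, 0, d) t = (lens ++ [1], 0, d) := by
          simp [pvLensStep, hnd, hs]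
        rw [hstep, ih.1 (lens ++ [1]) d hd, if_neg hs]
        simp
    · intro lens cur d hd hcur
      rw [List.foldl_cons]
      rw [pvTakeBlock_cons _ _ _ hd]
      by_cases hz : d + pvDepth t ≤ 0
      · have hstep : pvLensStep (lens, cur, d) t =
            (lens ++ [cur + 1], 0, d + pvDepth t) := by
          simp [pvLensStep, hd, hz]
        rw [hstep, ih.1 (lens ++ [cur + 1]) (d + pvDepth t) hz]
        rw [pvTakeBlock_nonpos r (d + pvDepth t) (by omega)]
        simp
      · have hstep : pvLensStep (lens, cur, d) t =
            (lens, cur + 1, d + pvDepth t) := by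
          simp [pvLensStep, hd, hz]
        rw [hstep, ih.2 lens (cur + 1) (d + pvDepth t) (by omega) (by omega)]
        simp only [List.length_cons]
        push_cast
        ring_nf

-- ---- B's stage 3 rebuilds the groups from their lengths ----
theorem pvChunks_groups (gs : List (List String)) : ∀ (out : List String),
    (((gs.map (fun g => (g.length : Int))).foldl pvChunkStep (out, gs.flatten)).1 =
      out ++ gs.map (fun g => PySem.Str.join " " g)) := by
  induction gs with
  | nil => intro out; simp
  | cons g gs' ih =>
    intro out
    rw [List.map_cons, List.foldl_cons, List.flatten_cons]
    have hstep : pvChunkStep (out, g ++ gs'.flatten) ((g.length : Int)) =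
        (out ++ [PySem.Str.join " " g], gs'.flatten) := by
      unfold pvChunkStep
      rw [PySem.List.slice_to _ (Int.natCast_nonneg _),
        PySem.List.slice_from _ (Int.natCast_nonneg _)]
      simp
    rw [hstep, ih (out ++ [PySem.Str.join " " g])]
    simp

-- ===== VERDICT (by name: the statement is the Claim_ definition above) =====
theorem preprocess_logo_program_py_spec : Claim_equal_preprocess_logo_program_py := by
  intro program_text _
  unfold Spec_preprocess_logo_program_py
  unfold preprocess_logo_program_py preprocess_logo_program_py_alt
  simp only [pvTokens_eq]
  set ts := pvTokF ((PySem.Str.split? program_text "\n").getD []) with hts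
  have hlens := (pvLens_groups ts).1 [] 0 le_rfl
  simp only [List.nil_append] at hlens
  rw [hlens]
  have hflat := pvGroups_flatten ts
  have hchunks := pvChunks_groups (pvGroups ts) []
  rw [hflat] at hchunks
  rw [hchunks, pvOuterA_groups]
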